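-- pv_equiv track=rewrite | github.com/pypi-data/pypi-mirror-74 | packages/xlist/xlist-0.0.10.tar.gz/xlist-0.0.10/xlist/pair.py | find_lst_vpair_when_fstltsnd
-- ===== SOURCE A (Python) =====
-- def find_lst_vpair_when_fstltsnd(arr):
--     lngth = len(arr)
--     for snd in range(lngth-1,0,-1):
--         fst = snd - 1
--         if(arr[fst]<arr[snd]):
--             return((arr[fst],arr[snd]))
--         else:
--             pass
--     return(None)
-- ===== SOURCE B (Python) =====
-- def find_lst_vpair_when_fstltsnd(arr):
--     result = None
--     for fst, snd in zip(arr, arr[1:]):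
--         if fst < snd:
--             result = (fst, snd)
--     return result
-- ===== Notes on version B (the rewrite author's own statement) =====
-- stated objective: simpler
-- what changed: Replaces the backward index loop with early return by a single forward pass over zipped adjacent pairs keeping the last qualifying pair in an accumulator (no indexing at all).
import Mathlib
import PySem

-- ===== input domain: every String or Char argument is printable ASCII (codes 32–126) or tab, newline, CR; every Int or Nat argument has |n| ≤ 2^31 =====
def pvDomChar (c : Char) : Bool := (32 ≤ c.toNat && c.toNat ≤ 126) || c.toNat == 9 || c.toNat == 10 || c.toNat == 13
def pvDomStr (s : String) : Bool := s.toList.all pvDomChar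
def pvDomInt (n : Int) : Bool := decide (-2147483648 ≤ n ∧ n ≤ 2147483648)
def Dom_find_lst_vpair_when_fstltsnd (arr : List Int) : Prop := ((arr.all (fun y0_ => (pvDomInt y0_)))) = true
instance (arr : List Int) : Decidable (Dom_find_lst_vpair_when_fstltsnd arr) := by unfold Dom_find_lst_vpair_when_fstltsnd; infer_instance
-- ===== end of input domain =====

-- B replaces A's backward index loop with early return by a single forward pass
-- over zipped adjacent pairs, keeping the last qualifying pair in an accumulator (objective: simpler).


-- ===== PORT A =====
-- loop 'for snd in range(lngth-1, 0, -1)': structural recursion over the index list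
def findLoopA (arr : List Int) : List Int → Option (Int × Int)
  | [] => none
  | snd :: rest =>
    let fst := snd - 1
    match PySem.List.pyGet? arr fst, PySem.List.pyGet? arr snd with
    | some a, some b => if a < b then some (a, b) else findLoopA arr rest
    | _, _ => none   -- unreachable: indices produced by the range are always in bounds

def find_lst_vpair_when_fstltsnd (arr : List Int) : Option (Int × Int) :=
  let lngth : Int := arr.length
  findLoopA arr (PySem.List.pyRange (lngth - 1) 0 (-1))

-- ===== PORT B =====
def find_lst_vpair_when_fstltsnd_alt (arr : List Int) : Option (Int × Int) :=
  (arr.zip (arr.drop 1)).foldl (fun result p => if p.1 < p.2 then some p else result) none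

-- ===== PRECONDITION & SPEC =====
def Spec_find_lst_vpair_when_fstltsnd (arr : List Int) (out : Option (Int × Int)) : Prop := out = find_lst_vpair_when_fstltsnd_alt arr
instance (arr : List Int) (out : Option (Int × Int)) : Decidable (Spec_find_lst_vpair_when_fstltsnd arr out) := by unfold Spec_find_lst_vpair_when_fstltsnd; infer_instance

-- ===== CLAIM (what is proved, stated in full; the proofs are below) =====
def Claim_equal_find_lst_vpair_when_fstltsnd : Prop := ∀ (arr : List Int), Dom_find_lst_vpair_when_fstltsnd arr → Spec_find_lst_vpair_when_fstltsnd arr (find_lst_vpair_when_fstltsnd arr)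

-- ===== LEMMAS AND PROOFS =====

-- B's fold keeps the LAST qualifying pair: it is find? over the reversed pair list.
theorem foldB_eq_find (ps : List (Int × Int)) (acc : Option (Int × Int)) :
    ps.foldl (fun result p => if p.1 < p.2 then some p else result) acc
      = (ps.reverse.find? (fun p => decide (p.1 < p.2))).or acc := by
  induction ps generalizing acc with
  | nil => simp
  | cons p ps ih =>
    simp only [List.foldl_cons, ih, List.reverse_cons, List.find?_append]
    by_cases h : p.1 < p.2 <;> simp [h]

-- A's backward index loop on range(n,0,-1) is find? over the reversed first-n pairs.
theorem loopA_eq_find (arr : List Int) (n : Nat) (hn : n + 1 ≤ arr.length) :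
    findLoopA arr (PySem.List.pyRange (n : Int) 0 (-1))
      = ((arr.zip (arr.drop 1)).take n).reverse.find? (fun p => decide (p.1 < p.2)) := by
  induction n with
  | zero => simp [PySem.List.pyRange_neg_one_eq_nil, findLoopA]
  | succ n ih =>
    have h1 : n < arr.length := by omega
    have h2 : n + 1 < arr.length := by omega
    have hz : n < (arr.zip (arr.drop 1)).length := by
      simp [List.length_zip]; omega
    rw [PySem.List.pyRange_neg_one_cons (by positivity : (0:Int) < ((n:Nat)+1 : Nat))]
    show findLoopA arr (((n:Nat)+1 : Int) :: _) = _
    have e1 : PySem.List.pyGet? arr (((n:Nat)+1 : Int) - 1) = some arr[n] := by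
      have : (((n:Nat)+1 : Int) - 1) = ((n : Nat) : Int) := by push_cast; ring
      rw [this, PySem.List.pyGet?_natCast, List.getElem?_eq_getElem h1]
    have e2 : PySem.List.pyGet? arr ((n:Nat)+1 : Int) = some arr[n+1] := by
      have : (((n:Nat)+1) : Int) = (((n+1 : Nat)) : Int) := by norm_cast
      rw [this, PySem.List.pyGet?_natCast, List.getElem?_eq_getElem h2]
    have hzn : (arr.zip (arr.drop 1))[n] = (arr[n], arr[n+1]) := by
      simp [List.getElem_zip]
    rw [List.take_add_one, List.getElem?_eq_getElem hz, hzn]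
    simp only [findLoopA, e1, e2, Option.toList_some, List.reverse_append,
      List.reverse_singleton, List.singleton_append, List.find?_cons]
    have hc : (((n + 1 : Nat) : Int) - 1) = ((n : Nat) : Int) := by push_cast; ring
    rw [hc]
    by_cases h : arr[n] < arr[n+1] <;> simp [h, ih (by omega)]

-- ===== VERDICT (by name: the statement is the Claim_ definition above) =====
theorem find_lst_vpair_when_fstltsnd_spec : Claim_equal_find_lst_vpair_when_fstltsnd := by
  intro arr _
  unfold Spec_find_lst_vpair_when_fstltsnd find_lst_vpair_when_fstltsnd find_lst_vpair_when_fstltsnd_alt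
  rw [foldB_eq_find, Option.or_none]
  cases harr : arr with
  | nil => simp [PySem.List.pyRange_neg_one_eq_nil, findLoopA]
  | cons x xs =>
    have h1 : 1 ≤ arr.length := by rw [harr]; simp
    have hlen : ((arr.length : Int) - 1) = ((arr.length - 1 : Nat) : Int) := by omega
    rw [← harr]
    show findLoopA arr (PySem.List.pyRange ((arr.length : Int) - 1) 0 (-1)) = _
    rw [hlen, loopA_eq_find arr (arr.length - 1) (by omega)]
    have : (arr.zip (arr.drop 1)).take (arr.length - 1) = arr.zip (arr.drop 1) := by
      apply List.take_of_length_le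
      simp [List.length_zip]
    rw [this]
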